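-- pv_equiv track=rewrite | github.com/TodimuJ/Python | card_valid.py | sumDoubleEvenLocation
-- ===== SOURCE A (Python) =====
-- def sumDoubleEvenLocation(number):
--     temp = []
--     count = 0
--     count1 = 0
--
--     for i in number[::2]:
--         temp.append(i)
--
--     temp = [int(a) for a in temp]
--
--     while count < len(temp):
--         temp[count] = temp[count]*2
--         count += 1
--
--     temp = [str(a) for a in temp]
--
--     while count1 < len(temp):
--         if len(temp[count1]) == 2:
--             temp[count1] = sum([int(x) for x in temp[count1]])
--         count1 += 1
--
--
--     return sum([int(x) for x in temp])
-- ===== SOURCE B (Python) =====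
-- def sumDoubleEvenLocation(number):
--     total = 0
--     for c in number[::2]:
--         d = int(c) * 2
--         total += d if d < 10 else d - 9
--     return total
-- ===== Notes on version B (the rewrite author's own statement) =====
-- stated objective: simpler
-- what changed: Replaces A's five sequential list-rebuilding passes (collect, int, doubling while-loop, stringify, string-length digit-sum while-loop, final sum of re-parsed entries) with a single accumulating loop that uses the arithmetic identity digit-sum(d) = d - 9 for doubled digits 10..18, with no intermediate lists or strings.
import Mathlib
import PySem

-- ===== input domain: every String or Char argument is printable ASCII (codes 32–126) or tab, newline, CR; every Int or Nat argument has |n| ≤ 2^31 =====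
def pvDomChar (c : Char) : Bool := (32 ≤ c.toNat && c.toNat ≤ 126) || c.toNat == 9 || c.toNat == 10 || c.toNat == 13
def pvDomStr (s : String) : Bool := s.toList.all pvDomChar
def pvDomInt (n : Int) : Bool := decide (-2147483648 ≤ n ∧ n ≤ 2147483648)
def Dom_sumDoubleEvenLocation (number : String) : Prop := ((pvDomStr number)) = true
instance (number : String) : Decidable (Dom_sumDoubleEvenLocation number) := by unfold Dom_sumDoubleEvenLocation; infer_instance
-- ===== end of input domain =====

-- B replaces A's five list-rebuilding passes (string digit-sum included) by one arithmetic
-- accumulating loop; objective: simpler.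

-- ===== PORT A =====

-- while count < len(temp): temp[count] = temp[count]*2; count += 1
def pvDoubleLoop (temp : List Int) (count : Nat) : List Int :=
  if h : count < temp.length then
    -- in-range, so getD's default is never used
    pvDoubleLoop (temp.set count (temp.getD count 0 * 2)) (count + 1)
  else temp
termination_by temp.length - count
decreasing_by simp_all; omega

-- After the stringify pass Python's temp holds strings, and the second while loop overwrites
-- some entries with ints: model an entry as Int ⊕ List Char.
-- while count1 < len(temp): if len(temp[count1]) == 2: temp[count1] = sum([int(x) for x in temp[count1]]); count1 += 1
def pvDigitBody (temp : List (Int ⊕ List Char)) (count1 : Nat) : List (Int ⊕ List Char) :=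
  match temp.getD count1 (.inl 0) with
  | .inr s =>
      if s.length = 2 then
        -- int(x) on a character of str(int) never raises: getD's default is never used
        temp.set count1 (.inl ((s.map (fun x => (PySem.Int.ofChars? [x]).getD 0)).sum))
      else temp
  | .inl _ => temp  -- unreachable in Python: entries before count1 only (len(int) would raise)

lemma pvDigitBody_length (temp : List (Int ⊕ List Char)) (count1 : Nat) :
    (pvDigitBody temp count1).length = temp.length := by
  unfold pvDigitBody; split <;> (try split) <;> simp

def pvDigitLoop (temp : List (Int ⊕ List Char)) (count1 : Nat) : List (Int ⊕ List Char) :=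
  if h : count1 < temp.length then
    pvDigitLoop (pvDigitBody temp count1) (count1 + 1)
  else temp
termination_by temp.length - count1
decreasing_by simp only [pvDigitBody_length]; omega

-- sum([int(x) for x in temp]): int of an int is itself, int of a str(int) re-parses it
def pvEntryInt (e : Int ⊕ List Char) : Int :=
  match e with
  | .inl n => n
  | .inr s => (PySem.Int.ofChars? s).getD 0  -- s is always str(int) here, never none

def sumDoubleEvenLocation (number : String) : Int :=
  -- for i in number[::2]: temp.append(i)   (step 2 ≠ 0: slice? never raises)
  let temp0 : List Char := (PySem.List.slice? number.toList none none 2).getD []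
  -- temp = [int(a) for a in temp]   (int(a) raises on a non-digit: excluded by Pre_)
  let temp1 : List Int := temp0.map (fun a => (PySem.Int.ofChars? [a]).getD 0)
  let temp2 : List Int := pvDoubleLoop temp1 0
  -- temp = [str(a) for a in temp]
  let temp3 : List (Int ⊕ List Char) := temp2.map (fun a => .inr (PySem.Int.toChars a))
  let temp4 := pvDigitLoop temp3 0
  (temp4.map pvEntryInt).sum

-- ===== PORT B =====
def sumDoubleEvenLocation_alt (number : String) : Int :=
  ((PySem.List.slice? number.toList none none 2).getD []).foldl
    (fun total c =>
      let d := (PySem.Int.ofChars? [c]).getD 0 * 2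
      total + (if d < 10 then d else d - 9)) 0

-- ===== PRECONDITION & SPEC =====
-- Pre_ excludes exactly the inputs where a character at an even position is not a digit:
-- there Python's int(a) raises ValueError (in A and in B alike).
def Pre_sumDoubleEvenLocation (number : String) : Prop :=
  (((PySem.List.slice? number.toList none none 2).getD []).all Char.isDigit) = true
instance (number : String) : Decidable (Pre_sumDoubleEvenLocation number) := by
  unfold Pre_sumDoubleEvenLocation; infer_instance

def pvWitness_sumDoubleEvenLocation : String := "42"

def Spec_sumDoubleEvenLocation (number : String) (out : Int) : Prop := out = sumDoubleEvenLocation_alt number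
instance (number : String) (out : Int) : Decidable (Spec_sumDoubleEvenLocation number out) := by unfold Spec_sumDoubleEvenLocation; infer_instance

-- ===== CLAIM (what is proved, stated in full; the proofs are below) =====
def Claim_equal_sumDoubleEvenLocation : Prop := ∀ (number : String), Dom_sumDoubleEvenLocation number → Pre_sumDoubleEvenLocation number → Spec_sumDoubleEvenLocation number (sumDoubleEvenLocation number)

-- ===== LEMMAS AND PROOFS =====

-- the second while loop is a map over the unprocessed suffix
def pvDigitStep (s : List Char) : Int ⊕ List Char :=
  if s.length = 2 then .inl ((s.map (fun x => (PySem.Int.ofChars? [x]).getD 0)).sum) else .inr s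

lemma pvDoubleLoop_eq (rest acc : List Int) :
    pvDoubleLoop (acc ++ rest) acc.length = acc ++ rest.map (· * 2) := by
  induction rest generalizing acc with
  | nil => unfold pvDoubleLoop; simp
  | cons x r ih =>
    unfold pvDoubleLoop
    rw [dif_pos (by simp)]
    have hget : (acc ++ x :: r).getD acc.length 0 = x := by simp [List.getD]
    have hset : (acc ++ x :: r).set acc.length (x * 2) = (acc ++ [x * 2]) ++ r := by simp
    rw [hget, hset]
    have := ih (acc ++ [x * 2])
    simpa using this

lemma pvDigitLoop_eq (l2 : List (List Char)) (l1 : List (Int ⊕ List Char)) :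
    pvDigitLoop (l1 ++ l2.map Sum.inr) l1.length = l1 ++ l2.map pvDigitStep := by
  induction l2 generalizing l1 with
  | nil => unfold pvDigitLoop; simp
  | cons s r ih =>
    unfold pvDigitLoop
    rw [dif_pos (by simp)]
    have hbody : pvDigitBody (l1 ++ (s :: r).map Sum.inr) l1.length
        = (l1 ++ [pvDigitStep s]) ++ r.map Sum.inr := by
      unfold pvDigitBody pvDigitStep
      have hget : (l1 ++ Sum.inr s :: r.map Sum.inr).getD l1.length (Sum.inl 0)
          = Sum.inr s := by simp [List.getD]
      simp only [List.map_cons, hget]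
      split <;> simp
    rw [hbody]
    have := ih (l1 ++ [pvDigitStep s])
    simpa using this

lemma pv_digit_mem (c : Char) (h : c.isDigit = true) :
    c ∈ ['0', '1', '2', '3', '4', '5', '6', '7', '8', '9'] := by
  simp [Char.isDigit] at h
  obtain ⟨h1, h2⟩ := h
  have h1' : 48 ≤ c.toNat := by exact_mod_cast UInt32.le_iff_toNat_le.mp h1
  have h2' : c.toNat ≤ 57 := by exact_mod_cast UInt32.le_iff_toNat_le.mp h2
  have hc : c = Char.ofNat c.toNat := (Char.ofNat_toNat c).symm
  rw [hc]
  generalize c.toNat = n at h1' h2'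
  interval_cases n <;> decide

lemma pv_pointwise (c : Char) (h : c.isDigit = true) :
    pvEntryInt (pvDigitStep (PySem.Int.toChars ((PySem.Int.ofChars? [c]).getD 0 * 2)))
      = (if (PySem.Int.ofChars? [c]).getD 0 * 2 < 10 then (PySem.Int.ofChars? [c]).getD 0 * 2
         else (PySem.Int.ofChars? [c]).getD 0 * 2 - 9) := by
  have hm := pv_digit_mem c h
  fin_cases hm <;> decide

-- ===== VERDICT (by name: the statement is the Claim_ definition above) =====
theorem sumDoubleEvenLocation_spec : Claim_equal_sumDoubleEvenLocation := by
  intro number _hdom hpre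
  unfold Spec_sumDoubleEvenLocation sumDoubleEvenLocation sumDoubleEvenLocation_alt
  dsimp only
  set es := (PySem.List.slice? number.toList none none 2).getD [] with hes
  have hdl := pvDoubleLoop_eq (es.map (fun a => (PySem.Int.ofChars? [a]).getD 0)) []
  simp only [List.nil_append, List.length_nil] at hdl
  rw [hdl]
  have hdg := pvDigitLoop_eq
      ((es.map (fun a => (PySem.Int.ofChars? [a]).getD 0)).map (· * 2) |>.map PySem.Int.toChars) []
  simp only [List.nil_append, List.length_nil, List.map_map, Function.comp_def] at hdg ⊢
  rw [hdg]
  rw [PySem.List.foldl_add es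
    (fun c => (if (PySem.Int.ofChars? [c]).getD 0 * 2 < 10 then (PySem.Int.ofChars? [c]).getD 0 * 2
               else (PySem.Int.ofChars? [c]).getD 0 * 2 - 9)) 0]
  simp only [List.map_map, Function.comp_def, zero_add]
  congr 1
  apply List.map_congr_left
  intro c hc
  have hpre' := List.all_eq_true.mp hpre
  exact pv_pointwise c (hpre' c hc)
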